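-- pv_equiv track=rewrite | github.com/osidekyle/ctci-problems | chapter 10/10.10_rank_from_stream.py | rankFromStream
-- ===== SOURCE A (Python) =====
-- class RankedNode:
--     def __init__(self, d):
--         self.data = d
--         self.left_size = 0
--         self.left, self.right = None, None
--
--
--     def insert(self, d):
--         if d <= self.data:
--             if self.left != None:
--                 self.left.insert(d)
--             else:
--                 self.left = RankedNode(d)
--             self.left_size += 1
--         elif d > self.data:
--             if self.right != None:
--                 self.right.insert(d)
--             else:
--                 self.right = RankedNode(d)
--
--     def getRank(self,d):
--         if d == self.data:
--             return self.left_size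
--         elif d < self.data:
--             if self.left == None:
--                 return -1
--             else:
--                 return self.left.getRank(d)
--         else:
--             right_size = -1 if self.right == None else self.right.getRank(d)
--             if right_size == -1:
--                 return -1
--             return self.left_size + 1 + right_size
--
-- def rankFromStream(stream, target):
--     root = None
--     for num in stream:
--         if root is None:
--             root = RankedNode(num)
--         else:
--             root.insert(num)
--
--     return root.getRank(target)
-- ===== SOURCE B (Python) =====
-- def rankFromStream(stream, target):
--     if target in stream:
--         return sum(1 for x in stream if x <= target) - 1
--     return -1
-- ===== Notes on version B (the rewrite author's own statement) =====
-- stated objective: faster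
-- what changed: Replaces the unbalanced rank-BST (build tree, then recursive rank search) with a single linear pass counting elements <= target, returning count-1 if target occurs, else -1.
import Mathlib
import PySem

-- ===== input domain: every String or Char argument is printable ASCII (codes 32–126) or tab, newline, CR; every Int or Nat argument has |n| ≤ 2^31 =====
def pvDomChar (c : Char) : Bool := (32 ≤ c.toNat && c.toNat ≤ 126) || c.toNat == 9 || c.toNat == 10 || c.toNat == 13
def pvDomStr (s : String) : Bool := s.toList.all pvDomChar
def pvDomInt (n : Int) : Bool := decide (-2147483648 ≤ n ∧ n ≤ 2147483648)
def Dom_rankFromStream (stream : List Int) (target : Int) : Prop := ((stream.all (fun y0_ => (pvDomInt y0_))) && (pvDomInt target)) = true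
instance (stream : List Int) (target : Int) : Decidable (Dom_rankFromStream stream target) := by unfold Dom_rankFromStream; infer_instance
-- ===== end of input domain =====

-- B replaces A's rank-BST with one linear counting pass; equivalence is about the return value.

-- ===== PORT A =====
-- RankedNode tree: data, left_size, left, right (None = leaf)
inductive RTree where
  | leaf : RTree
  | node : Int → Int → RTree → RTree → RTree
deriving DecidableEq, Repr

-- RankedNode.insert; inserting into None ('leaf') creates RankedNode(d)
def rtInsert : RTree → Int → RTree
  | .leaf, d => .node d 0 .leaf .leaf
  | .node data ls l r, d =>
    if d ≤ data then .node data (ls + 1) (rtInsert l d) r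
    else .node data ls l (rtInsert r d)

-- RankedNode.getRank; the 'left == None' / 'right == None' checks become leaf cases returning -1
def rtGetRank : RTree → Int → Int
  | .leaf, _ => -1
  | .node data ls l r, d =>
    if d = data then ls
    else if d < data then rtGetRank l d
    else
      let rs := rtGetRank r d
      if rs = -1 then -1 else ls + 1 + rs

def rankFromStream (stream : List Int) (target : Int) : Int :=
  let root := stream.foldl
    (fun acc num => match acc with
      | none => some (RTree.node num 0 .leaf .leaf)
      | some t => some (rtInsert t num)) none
  match root with
  | none => -1  -- Python raises AttributeError here; excluded by Pre_
  | some t => rtGetRank t target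

-- ===== PORT B =====
def rankFromStream_alt (stream : List Int) (target : Int) : Int :=
  if stream.contains target then (stream.countP (fun x => x ≤ target) : Int) - 1
  else -1

-- ===== PRECONDITION & SPEC =====
-- Pre_ excludes only the empty stream, on which A raises AttributeError (root is still None).
def Pre_rankFromStream (stream : List Int) (target : Int) : Prop := stream ≠ []
instance (stream : List Int) (target : Int) : Decidable (Pre_rankFromStream stream target) := by unfold Pre_rankFromStream; infer_instance
def pvWitness_rankFromStream : List Int × Int := ([3, 1, 4, 1, 5], 3)

def Spec_rankFromStream (stream : List Int) (target : Int) (out : Int) : Prop := out = rankFromStream_alt stream target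
instance (stream : List Int) (target : Int) (out : Int) : Decidable (Spec_rankFromStream stream target out) := by unfold Spec_rankFromStream; infer_instance

-- ===== CLAIM (what is proved, stated in full; the proofs are below) =====
def Claim_equal_rankFromStream : Prop := ∀ (stream : List Int) (target : Int), Dom_rankFromStream stream target → Pre_rankFromStream stream target → Spec_rankFromStream stream target (rankFromStream stream target)

-- ===== LEMMAS AND PROOFS =====

-- multiset of values stored in the tree, in-order
def rtElems : RTree → List Int
  | .leaf => []
  | .node d _ l r => rtElems l ++ d :: rtElems r

-- the structural invariant every tree built by rtInsert satisfies
def RtInv : RTree → Prop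
  | .leaf => True
  | .node d ls l r =>
      ls = ((rtElems l).length : Int) ∧ (∀ x ∈ rtElems l, x ≤ d) ∧ (∀ x ∈ rtElems r, d < x) ∧
      RtInv l ∧ RtInv r

theorem rtElems_insert (t : RTree) (x : Int) : (rtElems (rtInsert t x)).Perm (x :: rtElems t) := by
  induction t with
  | leaf => simp [rtInsert, rtElems]
  | node d ls l r ihl ihr =>
    by_cases h : x ≤ d
    · simpa [rtInsert, rtElems, h] using (ihl.append_right (d :: rtElems r))
    · simp only [rtInsert, rtElems, if_neg h]
      have s1 : (rtElems l ++ d :: rtElems (rtInsert r x)).Perm (rtElems l ++ d :: x :: rtElems r) :=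
        List.Perm.append_left _ (List.Perm.cons d ihr)
      have s2 : (rtElems l ++ d :: x :: rtElems r).Perm (rtElems l ++ x :: d :: rtElems r) :=
        List.Perm.append_left _ (List.Perm.swap x d _)
      exact (s1.trans s2).trans List.perm_middle

theorem rtInv_insert (t : RTree) (x : Int) (h : RtInv t) : RtInv (rtInsert t x) := by
  induction t with
  | leaf => simp [rtInsert, RtInv, rtElems]
  | node d ls l r ihl ihr =>
    obtain ⟨hls, hl, hr, il, ir⟩ := h
    by_cases hx : x ≤ d
    · have p1 : ls + 1 = ((rtElems (rtInsert l x)).length : Int) := by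
        rw [(rtElems_insert l x).length_eq, List.length_cons]
        push_cast
        omega
      have p2 : ∀ y ∈ rtElems (rtInsert l x), y ≤ d := by
        intro y hy
        rcases List.mem_cons.mp ((rtElems_insert l x).mem_iff.mp hy) with h1 | h1
        · exact h1 ▸ hx
        · exact hl y h1
      have hinv : RtInv (RTree.node d (ls + 1) (rtInsert l x) r) := ⟨p1, p2, hr, ihl il, ir⟩
      simpa [rtInsert, if_pos hx] using hinv
    · have p2 : ∀ y ∈ rtElems (rtInsert r x), d < y := by
        intro y hy
        rcases List.mem_cons.mp ((rtElems_insert r x).mem_iff.mp hy) with h1 | h1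
        · exact h1 ▸ (lt_of_not_ge hx)
        · exact hr y h1
      have hinv : RtInv (RTree.node d ls l (rtInsert r x)) := ⟨hls, hl, p2, il, ihr ir⟩
      simpa [rtInsert, if_neg hx] using hinv

theorem rtGetRank_eq (t : RTree) (d : Int) (h : RtInv t) :
    rtGetRank t d = if d ∈ rtElems t then ((rtElems t).countP (fun x => decide (x ≤ d)) : Int) - 1 else -1 := by
  induction t with
  | leaf => simp [rtGetRank, rtElems]
  | node data ls l r ihl ihr =>
    obtain ⟨hls, hl, hr, il, ir⟩ := h
    simp only [rtGetRank, rtElems]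
    by_cases h1 : d = data
    · subst h1
      have cl : (rtElems l).countP (fun x => decide (x ≤ d)) = (rtElems l).length :=
        List.countP_eq_length.mpr (fun x hx => decide_eq_true (hl x hx))
      have cr : (rtElems r).countP (fun x => decide (x ≤ d)) = 0 :=
        List.countP_eq_zero.mpr (fun x hx => by simpa using not_le.mpr (hr x hx))
      simp [List.countP_append, cl, cr, hls]
    · rw [if_neg h1]
      by_cases h2 : d < data
      · rw [if_pos h2]
        have hmem : (d ∈ rtElems l ++ data :: rtElems r) ↔ d ∈ rtElems l := by
          simp only [List.mem_append, List.mem_cons]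
          constructor
          · rintro (h | h | h)
            · exact h
            · exact absurd h h1
            · exact absurd (hr d h) (not_lt.mpr (le_of_lt h2))
          · exact Or.inl
        have cd : ¬ (data ≤ d) := not_le.mpr h2
        have cr : (rtElems r).countP (fun x => decide (x ≤ d)) = 0 :=
          List.countP_eq_zero.mpr (fun x hx => by
            simpa using not_le.mpr (lt_trans h2 (hr x hx)))
        rw [ihl il]
        by_cases hm : d ∈ rtElems l
        · rw [if_pos hm, if_pos (hmem.mpr hm)]
          simp [List.countP_append, cd, cr]
        · rw [if_neg hm, if_neg (fun hc => hm (hmem.mp hc))]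
      · rw [if_neg h2]
        have hdd : data < d := lt_of_le_of_ne (not_lt.mp h2) (Ne.symm h1)
        have hmem : (d ∈ rtElems l ++ data :: rtElems r) ↔ d ∈ rtElems r := by
          simp only [List.mem_append, List.mem_cons]
          constructor
          · rintro (h | h | h)
            · exact absurd (hl d h) (not_le.mpr hdd)
            · exact absurd h h1
            · exact h
          · exact fun h => Or.inr (Or.inr h)
        have cl : (rtElems l).countP (fun x => decide (x ≤ d)) = (rtElems l).length :=
          List.countP_eq_length.mpr (fun x hx => decide_eq_true (le_of_lt (lt_of_le_of_lt (hl x hx) hdd)))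
        have cd : data ≤ d := le_of_lt hdd
        rw [ihr ir]
        by_cases hm : d ∈ rtElems r
        · have hcnt : 0 < (rtElems r).countP (fun x => decide (x ≤ d)) :=
            List.countP_pos_iff.mpr ⟨d, hm, by simp⟩
          have hne : ((rtElems r).countP (fun x => decide (x ≤ d)) : Int) - 1 ≠ -1 := by
            omega
          rw [if_pos hm, if_neg hne, if_pos (hmem.mpr hm)]
          simp only [List.countP_append, List.countP_cons, cl, cd, decide_true, hls]
          push_cast
          ring
        · rw [if_neg hm]
          simp [hmem, hm]

theorem fold_builds (xs : List Int) : ∀ (t : RTree), RtInv t →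
    ∃ t', xs.foldl (fun acc num => match acc with
      | none => some (RTree.node num 0 .leaf .leaf)
      | some t => some (rtInsert t num)) (some t) = some t' ∧ RtInv t' ∧ (rtElems t').Perm (rtElems t ++ xs) := by
  induction xs with
  | nil => exact fun t h => ⟨t, rfl, h, by simp⟩
  | cons x xs ih =>
    intro t h
    obtain ⟨t', h1, h2, h3⟩ := ih (rtInsert t x) (rtInv_insert t x h)
    refine ⟨t', h1, h2, ?_⟩
    have s1 : (rtElems t').Perm ((x :: rtElems t) ++ xs) :=
      h3.trans ((rtElems_insert t x).append_right xs)
    exact s1.trans (by simpa using (List.perm_middle (a := x) (l₁ := rtElems t) (l₂ := xs)).symm)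

-- ===== VERDICT (by name: the statement is the Claim_ definition above) =====
theorem rankFromStream_spec : Claim_equal_rankFromStream := by
  intro stream target _ hpre
  unfold Spec_rankFromStream rankFromStream rankFromStream_alt
  match stream, hpre with
  | x :: xs, _ =>
    simp only [List.foldl_cons]
    obtain ⟨t', h1, h2, h3⟩ := fold_builds xs (RTree.node x 0 .leaf .leaf) (by simp [RtInv, rtElems])
    rw [h1]
    show rtGetRank t' target = _
    have hperm : (rtElems t').Perm (x :: xs) := by simpa [rtElems] using h3
    rw [rtGetRank_eq t' target h2]
    simp only [hperm.mem_iff, hperm.countP_eq, List.contains_iff_mem]
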